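-- pv_equiv track=rewrite | github.com/brianb72/bgo | bgo/preferred_rotation.py | convert_move_pair_list_to_opening_string
-- ===== SOURCE A (Python) =====
-- def convert_move_pair_list_to_opening_string(move_pair_list):
--     ret = ''
--     for x, y in move_pair_list:
--         if x == 'j' and y =='j':
--             continue    # ignore center point, omit it from return string
--         elif x == 'j':
--             if y < 'j':
--                 ret += 'H'
--             else:
--                 ret += 'h'
--         elif y == 'j':
--             if x < 'j':
--                 ret += 'v'
--             else:
--                 ret += 'V'
--         elif x < 'j':
--             if y < 'j':
--                 ret += 'L'
--             else:
--                 ret += 'l'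
--         elif x > 'j':
--             if y < 'j':
--                 ret += 'R'
--             else:
--                 ret += 'r'
--         else:
--             raise ValueError('NEVER HIT ME')
--
--     return ret
-- ===== SOURCE B (Python) =====
-- # Two staged passes: encode EVERY pair (center included, as a placeholder '.')
-- # by indexing a 9-char code string with rank(x)*3 + rank(y), where
-- # rank(s) = (s >= 'j') + (s > 'j') in {0,1,2}; then strip the placeholders
-- # in a single replace pass.
-- _CODES = "LvlH.hRVr"
--
-- def convert_move_pair_list_to_opening_string(move_pair_list):
--     raw = ''.join(_CODES[3 * ((x >= 'j') + (x > 'j')) + (y >= 'j') + (y > 'j')]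
--                   for x, y in move_pair_list)
--     return raw.replace('.', '')
-- ===== Notes on version B (the rewrite author's own statement) =====
-- stated objective: alternative
-- what changed: Instead of A's single loop with a nested if/elif cascade that skips centers, B runs two staged passes: it first encodes every pair (centers included, as a placeholder) by arithmetic indexing into a fixed 9-character code string with rank(x)*3+rank(y) where rank(s)=(s>='j')+(s>'j'), then deletes the placeholders with one replace pass.
import Mathlib
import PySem

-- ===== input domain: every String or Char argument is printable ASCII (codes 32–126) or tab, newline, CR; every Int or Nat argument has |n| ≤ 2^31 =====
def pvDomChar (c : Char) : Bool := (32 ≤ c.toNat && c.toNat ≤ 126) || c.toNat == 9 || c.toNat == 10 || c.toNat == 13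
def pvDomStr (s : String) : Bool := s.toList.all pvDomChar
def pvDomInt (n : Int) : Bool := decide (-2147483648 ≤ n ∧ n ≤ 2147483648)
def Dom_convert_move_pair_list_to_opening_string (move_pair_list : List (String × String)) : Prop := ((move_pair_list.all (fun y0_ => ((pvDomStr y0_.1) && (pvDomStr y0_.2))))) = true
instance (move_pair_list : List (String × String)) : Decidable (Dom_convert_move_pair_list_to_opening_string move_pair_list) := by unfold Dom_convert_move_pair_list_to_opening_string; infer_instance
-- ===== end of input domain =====

-- B replaces A's single branch-cascade loop (which skips centers) by two staged
-- passes: encode every pair into a fixed 9-char code string via rank arithmetic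
-- (center → placeholder '.'), then delete the placeholders with one replace.
-- Same O(n) cost ("alternative"); equivalence is about return values.

-- ===== PORT A =====
-- one iteration of A's for-loop body (the final 'else: raise' branch is
-- unreachable — x =/</> "j" is exhaustive — so it returns ret unchanged)
def pvStepA (ret : String) (p : String × String) : String :=
  if p.1 = "j" ∧ p.2 = "j" then ret
  else if p.1 = "j" then (if p.2 < "j" then ret ++ "H" else ret ++ "h")
  else if p.2 = "j" then (if p.1 < "j" then ret ++ "v" else ret ++ "V")
  else if p.1 < "j" then (if p.2 < "j" then ret ++ "L" else ret ++ "l")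
  else if p.1 > "j" then (if p.2 < "j" then ret ++ "R" else ret ++ "r")
  else ret

def convert_move_pair_list_to_opening_string (move_pair_list : List (String × String)) : String :=
  move_pair_list.foldl pvStepA ""

-- ===== PORT B =====
-- the _CODES constant of Source B
def pvCodes : List Char := ['L', 'v', 'l', 'H', '.', 'h', 'R', 'V', 'r']

-- 3*((x >= 'j') + (x > 'j')) + (y >= 'j') + (y > 'j'), Python bools as ints
def pvIdx (x y : String) : Nat :=
  3 * ((if x ≥ "j" then 1 else 0) + (if x > "j" then 1 else 0))
    + (if y ≥ "j" then 1 else 0) + (if y > "j" then 1 else 0)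

-- _CODES[i]; i is always in 0..8, so Python's indexing never raises and
-- equals getD (exact on in-range non-negative indices)
def pvEnc (p : String × String) : Char := pvCodes.getD (pvIdx p.1 p.2) '.'

def convert_move_pair_list_to_opening_string_alt (move_pair_list : List (String × String)) : String :=
  PySem.Str.replace
    (PySem.Str.join "" (move_pair_list.map (fun p => String.ofList [pvEnc p]))) "." ""

-- ===== PRECONDITION & SPEC =====
def Spec_convert_move_pair_list_to_opening_string (move_pair_list : List (String × String)) (out : String) : Prop := out = convert_move_pair_list_to_opening_string_alt move_pair_list
instance (move_pair_list : List (String × String)) (out : String) : Decidable (Spec_convert_move_pair_list_to_opening_string move_pair_list out) := by unfold Spec_convert_move_pair_list_to_opening_string; infer_instance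

-- ===== CLAIM =====
def Claim_equal_convert_move_pair_list_to_opening_string : Prop := ∀ (move_pair_list : List (String × String)), Dom_convert_move_pair_list_to_opening_string move_pair_list → Spec_convert_move_pair_list_to_opening_string move_pair_list (convert_move_pair_list_to_opening_string move_pair_list)

-- ===== LEMMAS AND PROOFS =====
-- replace.go with pattern "." and empty replacement just filters out '.'
theorem pv_replace_go (fuel : Nat) (l acc : List Char) (h : l.length ≤ fuel) :
    PySem.Chars.replace.go ['.'] [] fuel l acc
      = acc.reverse ++ l.filter (· ≠ '.') := by
  induction fuel generalizing l acc with
  | zero =>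
    cases l with
    | nil => simp [PySem.Chars.replace.go]
    | cons c t => simp at h
  | succ n ih =>
    cases l with
    | nil => simp [PySem.Chars.replace.go]
    | cons c t =>
      rw [PySem.Chars.replace.go]
      by_cases hc : c = '.'
      · subst hc
        simp [List.isPrefixOf, ih t acc (by simpa using h)]
      · have hc' : ¬('.' = c) := fun e => hc e.symm
        simp [List.isPrefixOf, hc, hc', ih t (c :: acc) (by simpa using h)]

theorem pv_replace_filter (l : List Char) :
    PySem.Chars.replace l ['.'] [] = l.filter (· ≠ '.') := by
  rw [PySem.Chars.replace]
  simp [pv_replace_go l.length l []]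

-- B's value as a filter over the encoded characters
theorem pv_alt_toList (l : List (String × String)) :
    (convert_move_pair_list_to_opening_string_alt l).toList
      = (l.map pvEnc).filter (· ≠ '.') := by
  unfold convert_move_pair_list_to_opening_string_alt
  rw [PySem.Str.toList_replace, PySem.Str.toList_join]
  have h1 : (l.map (fun p => String.ofList [pvEnc p])).map String.toList
      = (l.map pvEnc).map ([·]) := by simp [List.map_map]
  rw [h1, show ("".toList : List Char) = [] from rfl,
    PySem.Chars.join_nil_singletons]
  exact pv_replace_filter _

-- one step of A appends exactly B's encoded character (or nothing at the center)
theorem pv_step (acc : String) (p : String × String) :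
    (pvStepA acc p).toList
      = acc.toList ++ (if pvEnc p = '.' then [] else [pvEnc p]) := by
  obtain ⟨x, y⟩ := p
  rcases lt_trichotomy x "j" with hx | hx | hx <;>
    rcases lt_trichotomy y "j" with hy | hy | hy <;>
      simp_all [pvStepA, pvEnc, pvIdx, pvCodes, ne_of_lt, ne_of_gt, not_lt_of_gt,
        le_of_lt, not_le_of_gt, String.lt_iff_toList_lt]

theorem pv_loop (l : List (String × String)) (acc : String) :
    (l.foldl pvStepA acc).toList
      = acc.toList ++ ((l.map pvEnc).filter (· ≠ '.')) := by
  induction l generalizing acc with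
  | nil => simp
  | cons p t ih =>
    simp only [List.foldl_cons, List.map_cons, List.filter]
    rw [ih, pv_step]
    by_cases h : pvEnc p = '.' <;> simp [h]

-- ===== VERDICT =====
theorem convert_move_pair_list_to_opening_string_spec : Claim_equal_convert_move_pair_list_to_opening_string := by
  intro l _
  unfold Spec_convert_move_pair_list_to_opening_string convert_move_pair_list_to_opening_string
  have := pv_loop l ""
  rw [← String.toList_inj, pv_alt_toList]
  simpa using this
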